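-- pv_equiv track=rewrite | github.com/jadesym/interview | leetcode/1442.count-triplets-that-can-form-two-arrays-of-equal-xor/solution.py | getComboCounts
-- ===== SOURCE A (Python) =====
-- from typing import List
--
-- def getComboCounts(indices: List[int]) -> int:
--     if len(indices) == 1: return 0
--     count = 0
--     for i in range(len(indices) - 1):
--         for j in range(i + 1, len(indices)):
--             iIndex = indices[i]
--             jIndex = indices[j]
--             count += jIndex - iIndex - 1
--     return count
-- ===== SOURCE B (Python) =====
-- from typing import List
--
-- def getComboCounts(indices: List[int]) -> int:
--     # One pass: each element pairs (as the larger index j) with every earlier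
--     # element; the pairs ending at x contribute seen*x - prefix_sum - seen.
--     total = 0
--     prefix_sum = 0
--     seen = 0
--     for x in indices:
--         total += seen * x - prefix_sum - seen
--         prefix_sum += x
--         seen += 1
--     return total
-- ===== Notes on version B (the rewrite author's own statement) =====
-- stated objective: faster
-- what changed: Replaced the nested O(n^2) loops over all index pairs by a single pass that keeps a running prefix sum and element count, adding each element's contribution as the pair's larger index in O(1).
import Mathlib
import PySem

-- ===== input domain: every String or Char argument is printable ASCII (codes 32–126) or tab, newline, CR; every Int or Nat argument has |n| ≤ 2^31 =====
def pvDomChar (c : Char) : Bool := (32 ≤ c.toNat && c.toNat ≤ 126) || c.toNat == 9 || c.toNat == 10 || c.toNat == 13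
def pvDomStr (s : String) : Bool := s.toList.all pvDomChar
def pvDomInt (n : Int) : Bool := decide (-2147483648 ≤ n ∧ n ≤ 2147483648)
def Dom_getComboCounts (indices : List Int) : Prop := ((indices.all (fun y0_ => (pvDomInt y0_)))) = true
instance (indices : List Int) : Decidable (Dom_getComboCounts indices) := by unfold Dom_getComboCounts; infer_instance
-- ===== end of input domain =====

-- B replaces A's quadratic nested loops by a single pass keeping a running
-- prefix sum and count (objective: faster, O(n) instead of O(n^2)).

-- ===== PORT A =====
def getComboCounts (indices : List Int) : Int :=
  if indices.length = 1 then 0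
  else
    (PySem.List.pyRange 0 ((indices.length : Int) - 1) 1).foldl
      (fun count i =>
        (PySem.List.pyRange (i + 1) (indices.length : Int) 1).foldl
          (fun count j =>
            let iIndex := PySem.List.pyGetD indices i 0
            let jIndex := PySem.List.pyGetD indices j 0
            count + (jIndex - iIndex - 1)) count)
      0

-- ===== PORT B =====
def getComboCounts_alt (indices : List Int) : Int :=
  (indices.foldl
    (fun st x => (st.1 + st.2.1 * x - st.2.2 - st.2.1, st.2.1 + 1, st.2.2 + x))
    (0, 0, 0)).1

-- ===== PRECONDITION & SPEC =====
def Spec_getComboCounts (indices : List Int) (out : Int) : Prop := out = getComboCounts_alt indices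
instance (indices : List Int) (out : Int) : Decidable (Spec_getComboCounts indices out) := by unfold Spec_getComboCounts; infer_instance

-- ===== CLAIM (what is proved, stated in full; the proofs are below) =====
def Claim_equal_getComboCounts : Prop := ∀ (indices : List Int), Dom_getComboCounts indices → Spec_getComboCounts indices (getComboCounts indices)

-- ===== LEMMAS AND PROOFS =====

/-- Sum of (xs[j] - xs[i] - 1) over all pairs i < j, grouped by the first index. -/
def pairSum : List Int → Int
  | [] => 0
  | x :: t => (t.sum - t.length * (x + 1)) + pairSum t

/-- Sum of the per-element map `y ↦ y - c`. -/
theorem sum_map_sub (t : List Int) (c : Int) :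
    (t.map (fun y => y - c - 1)).sum = t.sum - t.length * (c + 1) := by
  induction t with
  | nil => simp
  | cons a t ih => simp [ih]; ring

/-- B's fold, generalized over the accumulator. -/
theorem alt_fold (xs : List Int) : ∀ t c s : Int,
    (xs.foldl
      (fun st x => (st.1 + st.2.1 * x - st.2.2 - st.2.1, st.2.1 + 1, st.2.2 + x))
      (t, c, s)).1 = t + pairSum xs + c * xs.sum - xs.length * (s + c) := by
  induction xs with
  | nil => intro t c s; simp [pairSum]
  | cons x xs ih =>
    intro t c s
    simp only [List.foldl_cons, ih, pairSum, List.sum_cons, List.length_cons]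
    push_cast; ring

theorem alt_eq_pairSum (xs : List Int) : getComboCounts_alt xs = pairSum xs := by
  simp [getComboCounts_alt, alt_fold]

/-- The inner-term function of A, over Nat indices. -/
def gA (xs : List Int) (k : Nat) : Int :=
  ((xs.drop (k + 1)).map (fun y => y - xs.getD k 0 - 1)).sum

theorem inner_fold (xs : List Int) (count i : Int) (hi : 0 ≤ i) :
    (PySem.List.pyRange (i + 1) ((xs.length : Int)) 1).foldl
      (fun count j => count + (PySem.List.pyGetD xs j 0 - PySem.List.pyGetD xs i 0 - 1)) count
    = count + gA xs i.toNat := by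
  rw [PySem.List.foldl_pyRange_pyGetD' xs 0
      (fun acc v => acc + (v - PySem.List.pyGetD xs i 0 - 1)) count (by omega : (0:Int) ≤ i + 1),
      PySem.List.foldl_add]
  have h1 : (i + 1).toNat = i.toNat + 1 := by omega
  rw [gA, h1, PySem.List.pyGetD_of_nonneg xs 0 hi]

theorem a_eq_sum_g (xs : List Int) :
    getComboCounts xs = ((List.range (xs.length - 1)).map (gA xs)).sum := by
  by_cases h1 : xs.length = 1
  · simp [getComboCounts, h1]
  · simp only [getComboCounts, if_neg h1]
    rw [PySem.List.foldl_congr_mem _ _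
        (fun count i => count + gA xs i.toNat) 0
        (by
          intro acc i hi
          have hmem := (PySem.List.mem_pyRange_one).1 hi
          exact inner_fold xs acc i hmem.1),
        PySem.List.foldl_add, PySem.List.pyRange_one]
    have hlen : ((xs.length : Int) - 1 - 0).toNat = xs.length - 1 := by omega
    simp only [List.map_map, hlen, zero_add]
    apply congrArg
    apply List.map_congr_left
    intro k _
    simp [gA]

theorem sum_g_eq_pairSum (xs : List Int) :
    ((List.range (xs.length - 1)).map (gA xs)).sum = pairSum xs := by
  induction xs with
  | nil => simp [pairSum]
  | cons x t ih =>
    cases t with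
    | nil => simp [pairSum]
    | cons y t' =>
      rw [show (x :: y :: t').length - 1 = (y :: t').length.pred + 1 from by simp,
          List.range_succ_eq_map]
      simp only [List.map_cons, List.map_map, List.sum_cons]
      have hshift : ((List.range (y :: t').length.pred).map (gA (x :: y :: t') ∘ Nat.succ)).sum
          = ((List.range ((y :: t').length - 1)).map (gA (y :: t'))).sum := by
        apply congrArg
        apply List.map_congr_left
        intro k _
        simp [gA]
      rw [hshift, ih]
      simp only [pairSum, gA, List.drop_succ_cons, List.drop_zero, List.getD_cons_zero,
        sum_map_sub, List.sum_cons, List.length_cons]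

-- ===== VERDICT (by name: the statement is the Claim_ definition above) =====
theorem getComboCounts_spec : Claim_equal_getComboCounts := by
  intro xs _
  show getComboCounts xs = getComboCounts_alt xs
  rw [a_eq_sum_g, sum_g_eq_pairSum, alt_eq_pairSum]
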